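-- pv_equiv track=rewrite | github.com/awolk/muse | basesonggen.py | entire_scale
-- ===== SOURCE A (Python) =====
-- def entire_scale(notes):
--     base_notes = {n % 12 for n in notes}
--     result = list(base_notes)
--     multiplier = 1
--     while max(result) < 126:
--         for n in base_notes:
--             result.append(n+12*multiplier)
--         multiplier += 1
--     return result
-- ===== SOURCE B (Python) =====
-- def entire_scale(notes):
--     base_notes = {n % 12 for n in notes}
--     m = max(base_notes)
--     octaves = (125 - m) // 12 + 2
--     return [n + 12 * k for k in range(octaves) for n in base_notes]
-- ===== Notes on version B (the rewrite author's own statement) =====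
-- stated objective: simpler
-- what changed: B replaces A's while loop that re-scans max(result) on every iteration (growing the list level by level until the max reaches 126) with a closed-form octave count (125 - max(base))//12 + 2 and a single nested comprehension over that range, iterating the same set so the order is identical.
import Mathlib
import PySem

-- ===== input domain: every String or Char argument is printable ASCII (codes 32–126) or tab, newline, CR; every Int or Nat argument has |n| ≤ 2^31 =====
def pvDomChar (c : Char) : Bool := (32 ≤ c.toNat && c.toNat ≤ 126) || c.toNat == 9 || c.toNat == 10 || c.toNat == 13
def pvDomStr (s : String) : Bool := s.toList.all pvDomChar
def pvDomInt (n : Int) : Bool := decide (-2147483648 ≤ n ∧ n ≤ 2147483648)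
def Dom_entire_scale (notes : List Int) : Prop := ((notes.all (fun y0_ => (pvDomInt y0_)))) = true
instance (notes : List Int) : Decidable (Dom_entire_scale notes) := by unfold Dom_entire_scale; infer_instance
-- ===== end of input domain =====

-- B replaces A's while loop (which re-scans max(result) every iteration) with a closed-form
-- octave count and one nested comprehension over the same set, in the same order; objective: simpler.


-- ===== PORT A =====
-- Both Pythons iterate the set {n % 12 for n in notes}, and the order of the returned LIST depends
-- on CPython's set iteration order.  For the values this set can hold (ints 0..11, hash(n) = n) that
-- order is deterministic; the helpers below model it exactly (hand port, validated against CPython 3.11):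
-- with ≤ 4 distinct values the table has size 8 and elements sit where the probe sequence
-- (i*5 + 1 + (perturb >>= 5)) & 7 put them; with ≥ 5 distinct values the table is resized to 32,
-- every value 0..11 gets its own slot, and iteration is ascending.

-- one CPython open-addressing probe/insert into the size-8 table (fuel only guards totality)
def pyProbe (t : List (Option Int)) (v : Int) (i : Nat) (perturb : Nat) (fuel : Nat) :
    List (Option Int) :=
  match fuel with
  | 0 => t
  | f + 1 =>
    match t.getD i none with
    | none => t.set i (some v)
    | some w =>
      if w = v then t
      else
        let p := perturb / 32
        pyProbe t v ((5 * i + 1 + p) % 8) p f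

def pyInsert8 (t : List (Option Int)) (v : Int) : List (Option Int) :=
  pyProbe t v (v.toNat % 8) v.toNat 64

-- iteration order of a CPython set of values 0..11, given the first-occurrence insertion sequence
def pySet12 (xs : List Int) : List Int :=
  if (PySem.List.dedup xs).length ≤ 4 then
    ((PySem.List.dedup xs).foldl pyInsert8 (List.replicate 8 none)).filterMap id
  else
    ((List.range 12).map Int.ofNat).filter (fun v => (PySem.List.dedup xs).contains v)

-- the while loop; fuel 12 only guards totality (max(base) ∈ [0,12), so ≤ 11 iterations run);
-- max? result = none is Python's ValueError on an empty result (outside Pre_)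
def entireLoop (base : List Int) (result : List Int) (multiplier : Int) (fuel : Nat) : List Int :=
  match fuel with
  | 0 => result
  | f + 1 =>
    match PySem.List.max? result (fun x => x) with
    | none => result
    | some mx =>
      if mx < 126 then
        entireLoop base (result ++ base.map (fun n => n + 12 * multiplier)) (multiplier + 1) f
      else result

def entire_scale (notes : List Int) : List Int :=
  entireLoop (pySet12 (notes.map (fun n => PySem.Int.mod n 12)))
    (pySet12 (notes.map (fun n => PySem.Int.mod n 12))) 1 12

-- ===== PORT B =====
def entire_scale_alt (notes : List Int) : List Int :=
  match PySem.List.max? (pySet12 (notes.map (fun n => PySem.Int.mod n 12))) (fun x => x) with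
  | none => []  -- Python: max() of empty set raises ValueError (outside Pre_)
  | some m =>
    (PySem.List.pyRange 0 (PySem.Int.floordiv (125 - m) 12 + 2) 1).flatMap
      (fun k => (pySet12 (notes.map (fun n => PySem.Int.mod n 12))).map (fun n => n + 12 * k))

-- ===== PRECONDITION & SPEC =====
-- Pre_ excludes only the empty list, on which both Pythons raise ValueError (max of empty sequence).
def Pre_entire_scale (notes : List Int) : Prop := notes ≠ []
instance (notes : List Int) : Decidable (Pre_entire_scale notes) := by
  unfold Pre_entire_scale; infer_instance

def pvWitness_entire_scale : List Int := [60, 62]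

def Spec_entire_scale (notes : List Int) (out : List Int) : Prop := out = entire_scale_alt notes
instance (notes : List Int) (out : List Int) : Decidable (Spec_entire_scale notes out) := by
  unfold Spec_entire_scale; infer_instance

-- ===== CLAIM (what is proved, stated in full; the proofs are below) =====
def Claim_equal_entire_scale : Prop := ∀ (notes : List Int), Dom_entire_scale notes → Pre_entire_scale notes → Spec_entire_scale notes (entire_scale notes)

-- ===== LEMMAS AND PROOFS =====

theorem entireLoop_some (b r : List Int) (mult : Int) (f : Nat) {mx : Int}
    (h : PySem.List.max? r (fun x => x) = some mx) :
    entireLoop b r mult (f + 1) =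
      if mx < 126 then
        entireLoop b (r ++ b.map (fun n => n + 12 * mult)) (mult + 1) f
      else r := by
  simp only [entireLoop, h]

-- levels 0..k of the scale, in the set's order
def pvLevels (b : List Int) (k : Nat) : List Int :=
  (List.range (k + 1)).flatMap (fun j : Nat => b.map (fun n => n + 12 * (j : Int)))

theorem pvLevels_zero (b : List Int) : pvLevels b 0 = b := by
  simp [pvLevels]

theorem pvLevels_succ (b : List Int) (k : Nat) :
    pvLevels b (k + 1) = pvLevels b k ++ b.map (fun n => n + 12 * ((k : Int) + 1)) := by
  simp [pvLevels, List.range_succ]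

theorem mem_pvLevels {b : List Int} {k : Nat} {x : Int} :
    x ∈ pvLevels b k ↔ ∃ j < k + 1, ∃ n ∈ b, n + 12 * (j : Int) = x := by
  simp [pvLevels, List.mem_flatMap, List.mem_range, List.mem_map]

theorem mem_pyProbe {x v : Int} :
    ∀ (f : Nat) (t : List (Option Int)) (i perturb : Nat),
      some x ∈ pyProbe t v i perturb f → some x ∈ t ∨ x = v := by
  intro f
  induction f with
  | zero => intro t i p h; exact Or.inl h
  | succ f ih =>
    intro t i p h
    simp only [pyProbe] at h
    cases hg : t.getD i none with
    | none =>
      rw [hg] at h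
      rcases List.mem_or_eq_of_mem_set h with h' | h'
      · exact Or.inl h'
      · exact Or.inr (Option.some.inj h')
    | some w =>
      rw [hg] at h
      by_cases hw : w = v
      · simp [hw] at h; exact Or.inl h
      · simp [hw] at h; exact ih _ _ _ h

theorem mem_foldl_pyInsert8 {x : Int} :
    ∀ (ds : List Int) (t : List (Option Int)),
      some x ∈ ds.foldl pyInsert8 t → some x ∈ t ∨ x ∈ ds := by
  intro ds
  induction ds with
  | nil => intro t h; exact Or.inl h
  | cons v ds ih =>
    intro t h
    rcases ih _ h with h' | h'
    · rcases mem_pyProbe _ _ _ _ h' with h'' | h''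
      · exact Or.inl h''
      · exact Or.inr (by simp [h''])
    · exact Or.inr (List.mem_cons_of_mem _ h')

theorem mem_pySet12 {xs : List Int} (hxs : ∀ x ∈ xs, 0 ≤ x ∧ x < 12) :
    ∀ x ∈ pySet12 xs, 0 ≤ x ∧ x < 12 := by
  intro x hx
  unfold pySet12 at hx
  split at hx
  · rcases List.mem_filterMap.1 hx with ⟨o, ho, hox⟩
    cases o with
    | none => simp at hox
    | some y =>
      simp at hox
      subst hox
      rcases mem_foldl_pyInsert8 _ _ ho with h | h
      · simp at h
      · exact hxs _ ((PySem.List.mem_dedup _ _).1 h)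
  · rcases List.mem_filter.1 hx with ⟨hm, _⟩
    rcases List.mem_map.1 hm with ⟨n, hn, rfl⟩
    simp only [List.mem_range] at hn
    simp only [Int.ofNat_eq_natCast]
    omega

-- the loop, started at level k with fuel strictly above L - k, runs exactly to level L
theorem entireLoop_eq_pvLevels {b : List Int} {m : Int}
    (hm : PySem.List.max? b (fun x => x) = some m) (hm0 : 0 ≤ m) (hm12 : m < 12)
    (L : Nat) (hL : L = if m ≤ 5 then 11 else 10) :
    ∀ (c k : Nat), k ≤ L → L ≤ k + c →
      entireLoop b (pvLevels b k) ((k : Int) + 1) (c + 1) = pvLevels b L := by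
  have hb : b ≠ [] := List.ne_nil_of_mem (PySem.List.max?_mem hm)
  have hmax : ∀ k : Nat, PySem.List.max? (pvLevels b k) (fun x => x) = some (m + 12 * k) := by
    intro k
    have hne : pvLevels b k ≠ [] := by
      intro h
      have : (m : Int) + 12 * k ∈ pvLevels b k :=
        mem_pvLevels.2 ⟨k, by omega, m, PySem.List.max?_mem hm, rfl⟩
      rw [h] at this; exact (List.not_mem_nil) this
    cases hw : PySem.List.max? (pvLevels b k) (fun x => x) with
    | none => exact absurd ((PySem.List.max?_eq_none_iff _ _).1 hw) hne
    | some w =>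
      have hwmem : w ∈ pvLevels b k := PySem.List.max?_mem hw
      rcases mem_pvLevels.1 hwmem with ⟨j, hj, n, hn, rfl⟩
      have hn_le : n ≤ m := PySem.List.max?_isMax hm n hn
      have h1 : n + 12 * (j : Int) ≤ m + 12 * k := by
        have : (j : Int) ≤ (k : Int) := by exact_mod_cast Nat.lt_succ_iff.1 hj
        nlinarith
      have h2 : m + 12 * (k : Int) ≤ n + 12 * (j : Int) :=
        PySem.List.max?_isMax hw _
          (mem_pvLevels.2 ⟨k, by omega, m, PySem.List.max?_mem hm, rfl⟩)
      have : n + 12 * (j : Int) = m + 12 * k := le_antisymm h1 h2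
      rw [this]
  intro c
  induction c with
  | zero =>
    intro k hkL hLk
    have hk : k = L := by omega
    subst hk
    have hnc : ¬ (m + 12 * (k : Int) < 126) := by
      by_cases h5 : m ≤ 5
      · have h11 : k = 11 := by rw [hL, if_pos h5]
        omega
      · have h10 : k = 10 := by rw [hL, if_neg h5]
        omega
    rw [entireLoop_some _ _ _ _ (hmax k), if_neg hnc]
  | succ c ih =>
    intro k hkL hLk
    by_cases hk : k = L
    · subst hk
      have hnc : ¬ (m + 12 * (k : Int) < 126) := by
        by_cases h5 : m ≤ 5
        · have h11 : k = 11 := by rw [hL, if_pos h5]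
          omega
        · have h10 : k = 10 := by rw [hL, if_neg h5]
          omega
      rw [entireLoop_some _ _ _ _ (hmax k), if_neg hnc]
    · have hklt : k < L := by omega
      have hcond : m + 12 * (k : Int) < 126 := by
        by_cases h5 : m ≤ 5
        · have h11 : L = 11 := by rw [hL, if_pos h5]
          omega
        · have h10 : L = 10 := by rw [hL, if_neg h5]
          omega
      rw [entireLoop_some _ _ _ _ (hmax k), if_pos hcond, ← pvLevels_succ]
      have hcast : ((k : Int) + 1) + 1 = ((k + 1 : Nat) : Int) + 1 := by push_cast; ring
      rw [hcast]
      exact ih (k + 1) (by omega) (by omega)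

theorem entire_scale_eq (notes : List Int) :
    entire_scale notes = entire_scale_alt notes := by
  have hmem : ∀ x ∈ pySet12 (notes.map (fun n => PySem.Int.mod n 12)), 0 ≤ x ∧ x < 12 := by
    apply mem_pySet12
    intro x hx
    rcases List.mem_map.1 hx with ⟨n, _, rfl⟩
    exact ⟨PySem.Int.mod_nonneg n (by norm_num), PySem.Int.mod_lt n (by norm_num)⟩
  unfold entire_scale entire_scale_alt
  cases hm : PySem.List.max? (pySet12 (notes.map (fun n => PySem.Int.mod n 12))) (fun x => x) with
  | none =>
    have hb : pySet12 (notes.map (fun n => PySem.Int.mod n 12)) = [] :=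
      (PySem.List.max?_eq_none_iff _ _).1 hm
    rw [hb]
    rfl
  | some m =>
    generalize hbdef : pySet12 (notes.map (fun n => PySem.Int.mod n 12)) = b at hm hmem ⊢
    have hm0 : 0 ≤ m := (hmem m (PySem.List.max?_mem hm)).1
    have hm12 : m < 12 := (hmem m (PySem.List.max?_mem hm)).2
    have hL11 : (if m ≤ 5 then 11 else 10 : Nat) ≤ 11 := by split <;> omega
    have hA : entireLoop b b 1 12 = pvLevels b (if m ≤ 5 then 11 else 10) := by
      have := entireLoop_eq_pvLevels hm hm0 hm12 (if m ≤ 5 then 11 else 10) rfl 11 0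
        (by omega) (by omega)
      rw [pvLevels_zero] at this
      simpa using this
    have hoct : PySem.Int.floordiv (125 - m) 12 + 2 =
        ((if m ≤ 5 then 11 else 10 : Nat) : Int) + 1 := by
      by_cases h5 : m ≤ 5
      · rw [(PySem.Int.floordiv_eq_iff_of_pos (by norm_num)).2 (show (10:Int) * 12 ≤ 125 - m ∧ 125 - m < (10 + 1) * 12 by omega), if_pos h5]
        norm_num
      · rw [(PySem.Int.floordiv_eq_iff_of_pos (by norm_num)).2 (show (9:Int) * 12 ≤ 125 - m ∧ 125 - m < (9 + 1) * 12 by omega), if_neg h5]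
        norm_num
    have hB : (PySem.List.pyRange 0 (PySem.Int.floordiv (125 - m) 12 + 2) 1).flatMap
        (fun k => b.map (fun n => n + 12 * k)) = pvLevels b (if m ≤ 5 then 11 else 10) := by
      rw [hoct, PySem.List.pyRange_one]
      have htn : ((((if m ≤ 5 then 11 else 10 : Nat) : Int) + 1 - 0)).toNat =
          (if m ≤ 5 then 11 else 10 : Nat) + 1 := by omega
      rw [htn]
      have hmapcast : (List.range ((if m ≤ 5 then 11 else 10 : Nat) + 1)).map
            (fun k : Nat => (0 : Int) + (k : Int)) =
          (List.range ((if m ≤ 5 then 11 else 10 : Nat) + 1)).map (fun k : Nat => (k : Int)) :=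
        List.map_congr_left (fun a _ => by omega)
      rw [hmapcast, List.flatMap_map]
      unfold pvLevels
      rfl
    rw [hA, ← hB]

-- ===== VERDICT (by name: the statement is the Claim_ definition above) =====
theorem entire_scale_spec : Claim_equal_entire_scale := by
  intro notes _ _
  unfold Spec_entire_scale
  exact entire_scale_eq notes
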